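-- pv_equiv track=rewrite | github.com/nin-lectro/MA214 | w1/ex1_2.py | peak_iter
-- ===== SOURCE A (Python) =====
-- def peak_iter(arr):
--     for i, value in enumerate(arr):
--         if i == 0 and value > arr[1]:
--             return i
--         elif i == len(arr) - 1:
--             return i
--         elif value > arr[i - 1] and value > arr[i + 1]:
--             return i
-- ===== SOURCE B (Python) =====
-- def peak_iter(arr):
--     if not arr:
--         return None
--     rises = [x < y for x, y in zip(arr, arr[1:])]
--     falls = [x > y for x, y in zip(arr, arr[1:])]
--     return next((i for i, (r, f) in enumerate(zip([True] + rises, falls)) if r and f),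
--                 len(arr) - 1)
-- ===== Notes on version B (the rewrite author's own statement) =====
-- stated objective: alternative
-- what changed: B precomputes pairwise rise/fall comparison lists once and picks the first index whose (prior-rise, fall) pair fires, with a plain len-1 fallback, instead of A's indexed enumerate scan that re-reads arr[i-1]/arr[i+1] and tests the i==0 and i==len-1 boundary branches on every iteration.
-- outside the precondition, e.g. on peak_iter([1]): A raises IndexError, B returns 0
import Mathlib
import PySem

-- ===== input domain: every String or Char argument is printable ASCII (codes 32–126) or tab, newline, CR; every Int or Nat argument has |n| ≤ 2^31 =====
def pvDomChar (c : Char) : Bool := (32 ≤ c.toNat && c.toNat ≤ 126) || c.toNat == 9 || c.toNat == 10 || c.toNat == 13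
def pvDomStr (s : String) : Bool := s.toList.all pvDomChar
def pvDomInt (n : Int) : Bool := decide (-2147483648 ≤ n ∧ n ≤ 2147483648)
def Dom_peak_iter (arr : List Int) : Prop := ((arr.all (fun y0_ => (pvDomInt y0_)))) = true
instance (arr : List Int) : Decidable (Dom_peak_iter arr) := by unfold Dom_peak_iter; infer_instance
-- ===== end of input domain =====

-- B precomputes pairwise rise/fall comparison lists and selects the first firing
-- (prior-rise, fall) pair, instead of A's indexed scan with in-loop boundary branches;
-- objective: alternative (same O(n) cost).

-- ===== PORT A =====
-- arr[j] with Python semantics; the .getD 0 default is only reached where Python A raises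
-- (arr[1] on a length-1 list), which Pre_peak_iter excludes.
def pyAt (arr : List Int) (j : Int) : Int := (PySem.List.pyGet? arr j).getD 0

-- the enumerate loop: i is the current index, rest the remaining values
def peak_iter_go (arr : List Int) (i : Int) (rest : List Int) : Option Int :=
  match rest with
  | [] => none
  | v :: rs =>
    if i = 0 ∧ v > pyAt arr 1 then some i
    else if i = (arr.length : Int) - 1 then some i
    else if v > pyAt arr (i - 1) ∧ v > pyAt arr (i + 1) then some i
    else peak_iter_go arr (i + 1) rs

def peak_iter (arr : List Int) : Option Int := peak_iter_go arr 0 arr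

-- ===== PORT B =====
-- next((i for i, (r, f) in enumerate(...) if r and f), default): first match or none
def altFind (l : List (Int × (Bool × Bool))) : Option Int :=
  match l with
  | [] => none
  | (i, rf) :: rest => if rf.1 && rf.2 then some i else altFind rest

def peak_iter_alt (arr : List Int) : Option Int :=
  if arr.length = 0 then none
  else
    let pairs := arr.zip (arr.drop 1)           -- zip(arr, arr[1:])
    let rises := pairs.map (fun p => decide (p.1 < p.2))
    let falls := pairs.map (fun p => decide (p.1 > p.2))
    match altFind (PySem.List.enumerate ((true :: rises).zip falls)) with
    | some i => some i
    | none => some ((arr.length : Int) - 1)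

-- ===== PRECONDITION & SPEC =====
-- Pre_ excludes exactly the length-1 lists, on which Python A raises IndexError at arr[1].
def Pre_peak_iter (arr : List Int) : Prop := arr.length ≠ 1
instance (arr : List Int) : Decidable (Pre_peak_iter arr) := by unfold Pre_peak_iter; infer_instance
def pvWitness_peak_iter : List Int := [1, 3, 2]

def Spec_peak_iter (arr : List Int) (out : Option Int) : Prop := out = peak_iter_alt arr
instance (arr : List Int) (out : Option Int) : Decidable (Spec_peak_iter arr out) := by unfold Spec_peak_iter; infer_instance

-- ===== CLAIM (what is proved, stated in full; the proofs are below) =====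
def Claim_equal_peak_iter : Prop := ∀ (arr : List Int), Dom_peak_iter arr → Pre_peak_iter arr → Spec_peak_iter arr (peak_iter arr)

-- ===== LEMMAS AND PROOFS =====

lemma pyAt_nat (arr : List Int) (k : Nat) (hk : k < arr.length) :
    pyAt arr (k : Int) = arr[k] := by
  simp [pyAt, PySem.List.pyGet?_natCast, List.getElem?_eq_getElem hk]

-- B's zipped pair list, named for the proofs
def pvZ (arr : List Int) : List (Bool × Bool) :=
  (true :: (arr.zip (arr.drop 1)).map (fun p => decide (p.1 < p.2))).zip
    ((arr.zip (arr.drop 1)).map (fun p => decide (p.1 > p.2)))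

lemma pvZ_length (arr : List Int) (_h : 1 ≤ arr.length) :
    (pvZ arr).length = arr.length - 1 := by
  simp [pvZ]

lemma pvZ_get (arr : List Int) (k : Nat) (hk : 1 ≤ k) (hk2 : k < arr.length - 1) :
    (pvZ arr)[k]'(by rw [pvZ_length arr (by omega)]; omega) =
      (decide (arr[k - 1]'(by omega) < arr[k]'(by omega)),
       decide (arr[k]'(by omega) > arr[k + 1]'(by omega))) := by
  have hz : ∀ (j : Nat) (hj : j < (arr.zip (arr.drop 1)).length),
      (arr.zip (arr.drop 1))[j] = (arr[j]'(by simp at hj; omega), arr[j + 1]'(by simp at hj; omega)) := by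
    intro j hj
    simp at hj
    rw [List.getElem_zip]
    congr 1
    rw [List.getElem_drop]
    congr 1
    omega
  unfold pvZ
  rw [List.getElem_zip]
  congr 1
  · have : k - 1 + 1 = k := by omega
    rw [List.getElem_cons]
    split
    · exfalso; omega
    · rw [List.getElem_map, hz (k - 1) (by simp; omega)]
      simp only [this]
  · rw [List.getElem_map, hz k (by simp; omega)]

lemma alt_eq (arr : List Int) : peak_iter_alt arr =
    (if arr.length = 0 then none
     else match altFind (PySem.List.enumerate (pvZ arr)) with
          | some i => some i
          | none => some ((arr.length : Int) - 1)) := rfl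

-- main loop correspondence: for 1 ≤ k < n, A's loop from index k equals
-- B's first-match search over the suffix of the pair list, with fallback n-1
lemma go_eq (arr : List Int) :
    ∀ (rest : List Int) (k : Nat), rest = arr.drop k → 1 ≤ k → k < arr.length →
    peak_iter_go arr (k : Int) rest =
      (match altFind (PySem.List.enumerate ((pvZ arr).drop k) k) with
       | some i => some i
       | none => some ((arr.length : Int) - 1)) := by
  intro rest
  induction rest with
  | nil =>
    intro k hdrop hk1 hklt
    exfalso
    have := congrArg List.length hdrop
    simp [List.length_drop] at this
    omega
  | cons v rs ih =>
    intro k hdrop hk1 hklt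
    have hv : v = arr[k] := by
      have := List.drop_eq_getElem_cons hklt
      rw [this] at hdrop
      exact (List.cons_eq_cons.mp hdrop.symm).1.symm
    by_cases hlast : k = arr.length - 1
    · -- last index: A returns k; B's suffix is empty, fallback n-1 = k
      have hz : (pvZ arr).drop k = [] := by
        apply List.drop_eq_nil_of_le
        rw [pvZ_length arr (by omega)]; omega
      rw [hz]
      simp only [peak_iter_go, PySem.List.enumerate, altFind]
      have hEq : (k : Int) = (arr.length : Int) - 1 := by omega
      simp [hEq]
    · -- interior index: both test the same condition, then recurse at k+1
      have hkn : k < arr.length - 1 := by omega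
      have hkz : k < (pvZ arr).length := by rw [pvZ_length arr (by omega)]; omega
      have hzd : (pvZ arr).drop k = (pvZ arr)[k] :: (pvZ arr).drop (k + 1) :=
        List.drop_eq_getElem_cons hkz
      rw [hzd, PySem.List.enumerate_cons, pvZ_get arr k hk1 hkn]
      simp only [peak_iter_go, altFind]
      have h0 : ¬((k : Int) = 0 ∧ v > pyAt arr 1) := by
        intro ⟨h, _⟩; omega
      have hne : ¬((k : Int) = (arr.length : Int) - 1) := by omega
      simp only [h0, hne, if_false]
      have hm1 : pyAt arr ((k : Int) - 1) = arr[k - 1]'(by omega) := by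
        have : (k : Int) - 1 = ((k - 1 : Nat) : Int) := by omega
        rw [this, pyAt_nat arr (k - 1) (by omega)]
      have hp1 : pyAt arr ((k : Int) + 1) = arr[k + 1]'(by omega) := by
        have : (k : Int) + 1 = ((k + 1 : Nat) : Int) := by push_cast; ring
        rw [this, pyAt_nat arr (k + 1) (by omega)]
      by_cases hc : v > pyAt arr ((k : Int) - 1) ∧ v > pyAt arr ((k : Int) + 1)
      · have : (decide (arr[k - 1]'(by omega) < arr[k]'hklt) &&
               decide (arr[k]'hklt > arr[k + 1]'(by omega))) = true := by
          rw [hm1, hv] at hc; rw [hp1, hv] at hc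
          simp [hc.1, hc.2]
        simp [hc, this]
      · have : (decide (arr[k - 1]'(by omega) < arr[k]'hklt) &&
               decide (arr[k]'hklt > arr[k + 1]'(by omega))) = false := by
          rw [hm1, hv] at hc; rw [hp1, hv] at hc
          by_contra h
          simp at h
          exact hc ⟨h.1, h.2⟩
        simp only [hc, if_false, this]
        have hrs : rs = arr.drop (k + 1) := by
          have := List.drop_eq_getElem_cons hklt
          rw [this] at hdrop
          exact (List.cons_eq_cons.mp hdrop.symm).2.symm
        have hcast : (k : Int) + 1 = ((k + 1 : Nat) : Int) := by push_cast; ring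
        rw [hcast]
        exact ih (k + 1) hrs (by omega) (by omega)

-- ===== VERDICT (by name: the statement is the Claim_ definition above) =====
theorem peak_iter_spec : Claim_equal_peak_iter := by
  intro arr _ hpre
  unfold Spec_peak_iter
  match harr : arr with
  | [] => decide
  | [x] => exact absurd (rfl : ([x] : List Int).length = 1) hpre
  | a :: b :: t =>
    have h1 : pyAt (a :: b :: t) 1 = b := by
      have : pyAt (a :: b :: t) ((1 : Nat) : Int) = (a :: b :: t)[1] :=
        pyAt_nat _ 1 (by simp)
      simpa using this
    have hzd : pvZ (a :: b :: t) =
        (true, decide (a > b)) :: (pvZ (a :: b :: t)).drop 1 := by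
      have h0 : 0 < (pvZ (a :: b :: t)).length := by
        rw [pvZ_length _ (by simp)]; simp
      have := List.drop_eq_getElem_cons h0
      simp only [List.drop_zero] at this
      rw [this]
      congr 1
    unfold peak_iter
    rw [alt_eq, hzd, PySem.List.enumerate_cons]
    rw [if_neg (by simp : ¬((a :: b :: t).length = 0))]
    rw [peak_iter_go, altFind]
    by_cases hab : a > b
    · have hcnd : (0 : Int) = 0 ∧ a > pyAt (a :: b :: t) 1 := ⟨rfl, by rw [h1]; exact hab⟩
      rw [if_pos hcnd]
      simp [hab]
    · have hcond1 : ¬((0 : Int) = 0 ∧ a > pyAt (a :: b :: t) 1) := by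
        intro ⟨_, h⟩; rw [h1] at h; omega
      have hcond2 : ¬((0 : Int) = (((a :: b :: t).length : Nat) : Int) - 1) := by
        simp; omega
      have hcond3 : ¬(a > pyAt (a :: b :: t) (0 - 1) ∧ a > pyAt (a :: b :: t) (0 + 1)) := by
        intro ⟨_, h⟩
        rw [show (0 : Int) + 1 = 1 by ring, h1] at h; omega
      rw [if_neg hcond1, if_neg hcond2, if_neg hcond3]
      have hfall : (((true, decide (a > b)).1 && (true, decide (a > b)).2) = true) = False := by
        simp [hab]
      simp only [hfall, if_false]
      have := go_eq (a :: b :: t) (b :: t) 1 (by simp) (by omega) (by simp)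
      simpa using this
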